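-- pv_equiv track=rewrite | github.com/pypi-data/pypi-mirror-74 | packages/xlist/xlist-0.0.4.tar.gz/xlist-0.0.4/xlist/elist.py | groupby_value_lngth
-- ===== SOURCE A (Python) =====
-- def groupby_value_lngth(l,keyname):
--     st = set({})
--     rslt = {}
--     for i in range(len(l)):
--         v = l[i].__getitem__(keyname)
--         lngth = len(v)
--         if(lngth in st):
--             rslt[lngth].append(l[i])
--         else:
--             st.add(lngth)
--             rslt[lngth] = [l[i]]
--     return(rslt)
-- ===== SOURCE B (Python) =====
-- def groupby_value_lngth(l, keyname):
--     lengths = [len(d[keyname]) for d in l]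
--     keys = []
--     for k in lengths:
--         if k not in keys:
--             keys.append(k)
--     return {k: [d for d, n in zip(l, lengths) if n == k] for k in keys}
-- ===== Notes on version B (the rewrite author's own statement) =====
-- stated objective: alternative
-- what changed: Replaces the single membership-tested pass with its st set and in-place dict append by a two-phase scheme: precompute all value lengths, collect the distinct lengths in first-occurrence order, then build each group with an independent filter pass over the list.
import Mathlib
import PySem

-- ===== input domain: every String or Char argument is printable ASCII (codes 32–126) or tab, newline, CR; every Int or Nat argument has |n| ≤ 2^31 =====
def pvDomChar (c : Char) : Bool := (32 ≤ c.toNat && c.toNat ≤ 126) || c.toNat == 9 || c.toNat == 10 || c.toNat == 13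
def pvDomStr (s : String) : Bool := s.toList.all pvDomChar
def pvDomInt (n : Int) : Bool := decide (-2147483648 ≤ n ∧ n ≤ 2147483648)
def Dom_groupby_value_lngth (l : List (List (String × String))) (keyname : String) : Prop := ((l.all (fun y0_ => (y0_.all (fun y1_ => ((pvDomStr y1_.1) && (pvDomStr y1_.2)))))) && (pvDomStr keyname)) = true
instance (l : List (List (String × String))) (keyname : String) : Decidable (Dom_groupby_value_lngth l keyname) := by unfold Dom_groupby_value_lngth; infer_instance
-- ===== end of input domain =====

-- B replaces A's single membership-tested pass (st set + in-place dict append) by a two-phase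
-- scheme: precompute the value lengths, collect the distinct lengths in first-occurrence order,
-- then build each group with an independent filter pass (objective: alternative decomposition).

-- ===== PORT A =====
def groupby_value_lngth (l : List (List (String × String))) (keyname : String) : List (Int × List (List (String × String))) :=
  let res := (PySem.List.pyRange 0 (l.length : Int) 1).foldl
    (fun (s : PySem.Set Int × PySem.Dict Int (List (List (String × String)))) i =>
      let item := PySem.List.pyGetD l i []
      -- l[i].__getitem__(keyname): Pre_ excludes the KeyError (none) case
      let v := ((PySem.Dict.mk item).get? keyname).getD ""
      let lngth := PySem.Str.len v
      if PySem.Set.contains s.1 lngth then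
        (s.1, s.2.modify lngth [] (· ++ [item]))
      else
        (PySem.Set.add s.1 lngth, s.2.insert lngth [item]))
    (PySem.Set.empty, PySem.Dict.empty)
  res.2.items

-- ===== PORT B =====
def groupby_value_lngth_alt (l : List (List (String × String))) (keyname : String) : List (Int × List (List (String × String))) :=
  let lengths := l.map (fun d => PySem.Str.len (((PySem.Dict.mk d).get? keyname).getD ""))
  let keys := lengths.foldl (fun (ks : List Int) k => if ks.contains k then ks else ks ++ [k]) []
  keys.map (fun k => (k, ((l.zip lengths).filter (fun p => p.2 == k)).map (·.1)))

-- ===== PRECONDITION & SPEC =====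
-- Pre_: every item must contain keyname; otherwise Python raises KeyError (in A's __getitem__, in B's d[keyname]).
def Pre_groupby_value_lngth (l : List (List (String × String))) (keyname : String) : Prop :=
  l.all (fun item => item.any (fun p => p.1 == keyname)) = true
instance (l : List (List (String × String))) (keyname : String) : Decidable (Pre_groupby_value_lngth l keyname) := by unfold Pre_groupby_value_lngth; infer_instance
def pvWitness_groupby_value_lngth : (List (List (String × String))) × String := ([[("k", "ab")], [("k", "x"), ("j", "zz")], [("k", "cd")]], "k")

def Spec_groupby_value_lngth (l : List (List (String × String))) (keyname : String) (out : List (Int × List (List (String × String)))) : Prop := out = groupby_value_lngth_alt l keyname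
instance (l : List (List (String × String))) (keyname : String) (out : List (Int × List (List (String × String)))) : Decidable (Spec_groupby_value_lngth l keyname out) := by unfold Spec_groupby_value_lngth; infer_instance

-- ===== CLAIM (what is proved, stated in full; the proofs are below) =====
def Claim_equal_groupby_value_lngth : Prop := ∀ (l : List (List (String × String))) (keyname : String), Dom_groupby_value_lngth l keyname → Pre_groupby_value_lngth l keyname → Spec_groupby_value_lngth l keyname (groupby_value_lngth l keyname)

-- ===== LEMMAS AND PROOFS =====

-- the key function both programs group by: length of the value stored at keyname
def pvKf (keyname : String) (d : List (String × String)) : Int :=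
  PySem.Str.len (((PySem.Dict.mk d).get? keyname).getD "")

-- the common grouped form both ports reduce to
def pvGroups (l : List (List (String × String))) (keyname : String) : List (Int × List (List (String × String))) :=
  (PySem.Set.ofList (l.map (pvKf keyname))).map
    (fun k => (k, l.filter (fun x => pvKf keyname x == k)))

lemma pv_set_contains_keys (d : PySem.Dict Int (List (List (String × String)))) (k : Int) :
    PySem.Set.contains d.keys k = d.contains k := by
  by_cases hk : k ∈ d.keys
  · simp [PySem.Set.contains, hk, (PySem.Dict.contains_iff_mem_keys d k).mpr hk]
  · have : d.contains k = false := by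
      cases hc : d.contains k
      · rfl
      · exact absurd ((PySem.Dict.contains_iff_mem_keys d k).mp hc) hk
    simp [PySem.Set.contains, hk, this]

-- A's (st, rslt) loop carries st = rslt.keys, and both branches are the same dict modify
lemma pv_A_loop_eq (keyname : String) (xs : List (List (String × String)))
    (d : PySem.Dict Int (List (List (String × String)))) :
    xs.foldl
      (fun (s : PySem.Set Int × PySem.Dict Int (List (List (String × String)))) x =>
        if PySem.Set.contains s.1 (pvKf keyname x) then
          (s.1, s.2.modify (pvKf keyname x) [] (· ++ [x]))
        else
          (PySem.Set.add s.1 (pvKf keyname x), s.2.insert (pvKf keyname x) [x]))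
      (d.keys, d)
      = ((xs.foldl (fun d x => d.modify (pvKf keyname x) [] (· ++ [x])) d).keys,
         xs.foldl (fun d x => d.modify (pvKf keyname x) [] (· ++ [x])) d) := by
  induction xs generalizing d with
  | nil => rfl
  | cons x xs ih =>
    simp only [List.foldl_cons, pv_set_contains_keys]
    cases hc : d.contains (pvKf keyname x)
    · have hmod : d.modify (pvKf keyname x) [] (· ++ [x]) = d.insert (pvKf keyname x) [x] := by
        simp [PySem.Dict.modify, PySem.Dict.getD_of_not_contains d [] hc]
      have hkeys : (d.insert (pvKf keyname x) [x]).keys = d.keys ++ [pvKf keyname x] :=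
        PySem.Dict.keys_insert_of_not_contains d [x] hc
      have hadd : PySem.Set.add d.keys (pvKf keyname x) = d.keys ++ [pvKf keyname x] := by
        have : pvKf keyname x ∉ d.keys := by
          intro hm; rw [(PySem.Dict.contains_iff_mem_keys d _).mpr hm] at hc; cases hc
        simp [PySem.Set.add, this]
      simp only [Bool.false_eq_true, if_false, hmod]
      rw [hadd, ← hkeys]
      exact ih _
    · have hkeys : (d.modify (pvKf keyname x) [] (· ++ [x])).keys = d.keys := by
        rw [PySem.Dict.keys_modify]
        exact PySem.Dict.keys_insert_of_contains d _ hc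
      simp only [if_true]
      rw [← hkeys]
      exact ih _

lemma pv_modify_fold_items (l : List (List (String × String))) (keyname : String) :
    ((l.foldl (fun d x => d.modify (pvKf keyname x) [] (· ++ [x]))
        (PySem.Dict.empty : PySem.Dict Int (List (List (String × String))))).items)
      = pvGroups l keyname := by
  set F := fun (d : PySem.Dict Int (List (List (String × String)))) x => d.modify (pvKf keyname x) [] (· ++ [x]) with hF
  have hnd : (l.foldl F PySem.Dict.empty).keys.Nodup :=
    PySem.Dict.nodup_keys_foldl_modify_key l (pvKf keyname) [] (fun d x => (· ++ [x])) _ (by simp [PySem.Dict.keys_empty])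
  rw [PySem.Dict.items_eq_map_keys _ hnd []]
  have hkeys : (l.foldl F PySem.Dict.empty).keys = PySem.Set.ofList (l.map (pvKf keyname)) := by
    rw [hF, PySem.Dict.keys_foldl_modify_key l (pvKf keyname) [] (fun d x => (· ++ [x]))]
    simp [PySem.Set.update, PySem.Set.ofList_eq_foldl, PySem.Dict.keys_empty]
  have hgetD : ∀ k : Int, (l.foldl F PySem.Dict.empty).getD k [] = l.filter (fun x => pvKf keyname x == k) := by
    intro k
    have : l.foldl F PySem.Dict.empty
        = (l.map (fun x => (pvKf keyname x, x))).foldl (fun d p => d.modify p.1 [] (· ++ [p.2])) PySem.Dict.empty := by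
      rw [List.foldl_map]
    rw [this, PySem.Dict.getD_foldl_modify_append]
    simp [List.filter_map, Function.comp_def]
  rw [hkeys]
  unfold pvGroups
  exact List.map_congr_left (fun k _ => by rw [hgetD k])

lemma pv_zip_map (l : List (List (String × String))) (f : List (String × String) → Int) :
    l.zip (l.map f) = l.map (fun x => (x, f x)) := by
  induction l with
  | nil => rfl
  | cons x t ih => simp [ih]

lemma A_eq_groups (l : List (List (String × String))) (keyname : String) :
    groupby_value_lngth l keyname = pvGroups l keyname := by
  simp only [groupby_value_lngth]
  have hk : ∀ d : List (String × String), PySem.Str.len (((PySem.Dict.mk d).get? keyname).getD "") = pvKf keyname d := fun _ => rfl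
  simp only [hk]
  have hrange := PySem.List.foldl_pyRange_pyGetD l []
    (fun (s : PySem.Set Int × PySem.Dict Int (List (List (String × String)))) x =>
      if PySem.Set.contains s.1 (pvKf keyname x) then
        (s.1, s.2.modify (pvKf keyname x) [] (· ++ [x]))
      else
        (PySem.Set.add s.1 (pvKf keyname x), s.2.insert (pvKf keyname x) [x]))
    (PySem.Set.empty, PySem.Dict.empty) (a := 0) le_rfl
  simp only [PySem.List.len, Int.toNat_zero, List.drop_zero] at hrange
  have hinit : ((PySem.Set.empty : PySem.Set Int),
      (PySem.Dict.empty : PySem.Dict Int (List (List (String × String)))))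
      = ((PySem.Dict.empty : PySem.Dict Int (List (List (String × String)))).keys, PySem.Dict.empty) := rfl
  rw [show (PySem.List.pyRange 0 (l.length : Int) 1) = PySem.List.pyRange 0 (l.length : Int) from rfl,
      hrange, hinit, pv_A_loop_eq]
  exact pv_modify_fold_items l keyname

lemma B_eq_groups (l : List (List (String × String))) (keyname : String) :
    groupby_value_lngth_alt l keyname = pvGroups l keyname := by
  simp only [groupby_value_lngth_alt, pvGroups]
  have hlen : (fun d => PySem.Str.len (((PySem.Dict.mk d).get? keyname).getD "")) = pvKf keyname := rfl
  rw [hlen]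
  have hkeys : (l.map (pvKf keyname)).foldl (fun (ks : List Int) k => if ks.contains k then ks else ks ++ [k]) []
      = PySem.Set.ofList (l.map (pvKf keyname)) := by
    rw [PySem.Set.ofList_eq_foldl]
    apply PySem.List.foldl_congr_mem
    intro ks k _
    simp [PySem.Set.add, PySem.Set.contains]
  rw [hkeys, pv_zip_map l (pvKf keyname)]
  refine List.map_congr_left (fun k _ => ?_)
  simp [List.filter_map, Function.comp_def]

-- ===== VERDICT (by name: the statement is the Claim_ definition above) =====
theorem groupby_value_lngth_spec : Claim_equal_groupby_value_lngth := by
  intro l keyname _ _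
  unfold Spec_groupby_value_lngth
  rw [A_eq_groups, B_eq_groups]
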